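-- pv_equiv track=rewrite | github.com/jskim7018/leetcode_study | algorithm_study/2025/12/20251219/easy/LC_3581.py | countOddLetters
-- ===== SOURCE A (Python) =====
-- from collections import Counter
--
-- def countOddLetters(n: int) -> int:
--     digit_words = ['zero', 'one', 'two', 'three', 'four', 'five',
--                    'six', 'seven', 'eight', 'nine']
--
--     counter = Counter()
--     while n > 0:
--         counter += Counter(digit_words[n%10])
--         n //= 10
--
--     ans = 0
--     for v in counter.values():
--         if v % 2==1:
--             ans += 1
--
--     return ans
-- ===== SOURCE B (Python) =====
-- def countOddLetters(n: int) -> int: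
--     words = ['zero', 'one', 'two', 'three', 'four', 'five',
--              'six', 'seven', 'eight', 'nine']
--
--     # First pass: a digit histogram only (no letters touched at all).
--     hist = [0] * 10
--     while n > 0:
--         hist[n % 10] += 1
--         n //= 10
--
--     # Second stage: for each letter of the alphabet, compute its total
--     # frequency arithmetically as a weighted sum over the ten fixed words.
--     ans = 0
--     for code in range(97, 123):
--         letter = chr(code)
--         total = sum(hist[d] * words[d].count(letter) for d in range(10))
--         ans += total % 2
--     return ans
-- ===== Notes on version B (the rewrite author's own statement) =====
-- stated objective: alternative
-- what changed: B never accumulates letter counts while scanning digits: it builds a digit histogram first, then for each alphabet letter computes its total frequency as a weighted sum hist[d]*words[d].count(letter) over the fixed digit words and adds that total mod two, instead of summing Counter objects per digit and scanning the counter's values for odd entries.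
import Mathlib
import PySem

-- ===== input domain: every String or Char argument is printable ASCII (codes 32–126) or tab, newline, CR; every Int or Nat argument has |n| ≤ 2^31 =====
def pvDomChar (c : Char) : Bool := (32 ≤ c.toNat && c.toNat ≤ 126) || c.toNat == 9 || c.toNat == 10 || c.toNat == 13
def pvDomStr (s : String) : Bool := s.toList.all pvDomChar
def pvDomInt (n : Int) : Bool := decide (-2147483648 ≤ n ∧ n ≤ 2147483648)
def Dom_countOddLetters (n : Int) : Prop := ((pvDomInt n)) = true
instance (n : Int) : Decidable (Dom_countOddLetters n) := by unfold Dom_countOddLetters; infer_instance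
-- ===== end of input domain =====

-- B replaces A's per-digit Counter accumulation by a 10-slot digit histogram
-- followed by a per-alphabet-letter weighted sum (total frequency mod 2).

-- ===== PORT A =====
def digitWordsA : List String :=
  ["zero", "one", "two", "three", "four", "five", "six", "seven", "eight", "nine"]

-- counter += Counter(w): fold the items of Counter(w) into the accumulator
-- (exact for Counter.__add__ here since every count involved is positive, so
-- nothing is dropped; order: existing keys keep their position, new keys append).
def addCounter (c : PySem.Dict Char Int) (w : List Char) : PySem.Dict Char Int :=
  (PySem.Dict.counter w).items.foldl (fun d p => d.modify p.1 0 (· + p.2)) c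

-- while n > 0: counter += Counter(digit_words[n % 10]); n //= 10
-- (n % 10 is always in range, so pyGet?'s default "" is never used)
def loopA (n : Int) (c : PySem.Dict Char Int) : PySem.Dict Char Int :=
  if h : n > 0 then
    loopA (PySem.Int.floordiv n 10)
      (addCounter c ((PySem.List.pyGet? digitWordsA (PySem.Int.mod n 10)).getD "").toList)
  else c
termination_by n.toNat
decreasing_by
  rw [PySem.Int.floordiv_eq_ediv_of_pos (by norm_num)]
  have h1 := Int.mul_ediv_add_emod n 10
  have h2 := Int.emod_nonneg n (by norm_num : (10:Int) ≠ 0)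
  have h3 := Int.emod_lt_of_pos n (by norm_num : (0:Int) < 10)
  omega

-- ans = 0; for v in counter.values(): if v % 2 == 1: ans += 1
def countOddOf (d : PySem.Dict Char Int) : Int :=
  d.values.foldl (fun ans v => if PySem.Int.mod v 2 == 1 then ans + 1 else ans) 0

def countOddLetters (n : Int) : Int :=
  countOddOf (loopA n PySem.Dict.empty)

-- ===== PORT B =====
def wordsB : List String :=
  ["zero", "one", "two", "three", "four", "five", "six", "seven", "eight", "nine"]

-- while n > 0: hist[n % 10] += 1; n //= 10
-- (n % 10 lies in 0..9 and len(hist) = 10, so the index is always in range;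
-- pyGetD/pySetD are the total forms of hist[i] / hist[i] = v)
def loopB (n : Int) (hist : List Int) : List Int :=
  if h : n > 0 then
    loopB (PySem.Int.floordiv n 10)
      (PySem.List.pySetD hist (PySem.Int.mod n 10)
        (PySem.List.pyGetD hist (PySem.Int.mod n 10) 0 + 1))
  else hist
termination_by n.toNat
decreasing_by
  rw [PySem.Int.floordiv_eq_ediv_of_pos (by norm_num)]
  have h1 := Int.mul_ediv_add_emod n 10
  have h2 := Int.emod_nonneg n (by norm_num : (10:Int) ≠ 0)
  have h3 := Int.emod_lt_of_pos n (by norm_num : (0:Int) < 10)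
  omega

-- total = sum(hist[d] * words[d].count(letter) for d in range(10))
def totalB (hist : List Int) (letter : String) : Int :=
  ((PySem.List.pyRange 0 10 1).map (fun d =>
      PySem.List.pyGetD hist d 0 *
        (PySem.Str.count (PySem.List.pyGetD wordsB d "") letter : Int))).sum

-- hist = [0]*10; for code in range(97,123): letter = chr(code); ans += total % 2
-- (chr(code) ported as Char.ofNat code.toNat: exact since 97 ≤ code ≤ 122 here)
def countOddLetters_alt (n : Int) : Int :=
  let hist := loopB n (List.replicate 10 0)
  (PySem.List.pyRange 97 123 1).foldl (fun ans code =>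
      ans + PySem.Int.mod (totalB hist (String.ofList [Char.ofNat code.toNat])) 2) 0

-- ===== PRECONDITION & SPEC =====
def Spec_countOddLetters (n : Int) (out : Int) : Prop := out = countOddLetters_alt n
instance (n : Int) (out : Int) : Decidable (Spec_countOddLetters n out) := by unfold Spec_countOddLetters; infer_instance

-- ===== CLAIM (what is proved, stated in full; the proofs are below) =====
def Claim_equal_countOddLetters : Prop := ∀ (n : Int), Dom_countOddLetters n → Spec_countOddLetters n (countOddLetters n)

-- ===== LEMMAS AND PROOFS =====

-- the ten digit words as char lists, and per-word letter counts
def wordsL : List (List Char) :=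
  ["zero".toList, "one".toList, "two".toList, "three".toList, "four".toList,
   "five".toList, "six".toList, "seven".toList, "eight".toList, "nine".toList]

def wcount (d : Nat) (k : Char) : Nat := (wordsL.getD d []).count k

-- The coupling invariant between A's counter and B's digit histogram.
def CInv (c : PySem.Dict Char Int) (hist : List Int) : Prop :=
  c.keys.Nodup ∧
  (∀ k ∈ c.keys, 97 ≤ k.toNat ∧ k.toNat ≤ 122) ∧
  hist.length = 10 ∧
  (∀ d, d < 10 → 0 ≤ hist.getD d 0) ∧
  (∀ k : Char, c.getD k 0
      = ((List.range 10).map (fun d => hist.getD d 0 * (wcount d k : Int))).sum)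

-- ---- A-side counter lemmas ----

lemma getD_foldl_modify_add (f : Char → Int) :
    ∀ (ks : List Char) (c : PySem.Dict Char Int) (x : Char), ks.Nodup →
    (ks.foldl (fun d k => d.modify k 0 (· + f k)) c).getD x 0
      = c.getD x 0 + (if x ∈ ks then f x else 0) := by
  intro ks
  induction ks with
  | nil => intro c x _; simp
  | cons k ks ih =>
    intro c x hnd
    rw [List.foldl_cons, ih _ x (List.nodup_cons.mp hnd).2, PySem.Dict.getD_modify]
    by_cases hx : x = k
    · subst hx
      have hxks : x ∉ ks := (List.nodup_cons.mp hnd).1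
      simp [hxks]
    · simp [hx, List.mem_cons]

lemma addCounter_eq_foldl_set (c : PySem.Dict Char Int) (w : List Char) :
    addCounter c w
      = (PySem.Set.ofList w).foldl
          (fun d k => d.modify k 0 (· + (w.count k : Int))) c := by
  unfold addCounter
  rw [PySem.Dict.items_counter, List.foldl_map]

lemma getD_addCounter (c : PySem.Dict Char Int) (w : List Char) (k : Char) :
    (addCounter c w).getD k 0 = c.getD k 0 + (w.count k : Int) := by
  rw [addCounter_eq_foldl_set,
    getD_foldl_modify_add _ _ c k (PySem.Set.nodup_ofList w)]
  by_cases hk : k ∈ w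
  · simp [PySem.Set.mem_ofList, hk]
  · simp [PySem.Set.mem_ofList, hk, List.count_eq_zero.mpr hk]

lemma mem_keys_addCounter (c : PySem.Dict Char Int) (w : List Char) (k : Char) :
    k ∈ (addCounter c w).keys ↔ k ∈ c.keys ∨ k ∈ w := by
  rw [addCounter_eq_foldl_set,
    PySem.Dict.keys_foldl_modify (PySem.Set.ofList w) 0
      (fun _ k v => v + (w.count k : Int)) c,
    PySem.Set.mem_update, PySem.Set.mem_ofList]

lemma nodup_keys_addCounter (c : PySem.Dict Char Int) (w : List Char)
    (h : c.keys.Nodup) : (addCounter c w).keys.Nodup := by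
  rw [addCounter_eq_foldl_set]
  exact PySem.Dict.nodup_keys_foldl_modify_key (PySem.Set.ofList w) (fun x => x) 0
    (fun _ k v => v + (w.count k : Int)) c h

lemma getD_zero_of_not_mem_keys (c : PySem.Dict Char Int) (k : Char)
    (h : k ∉ c.keys) : c.getD k 0 = 0 := by
  apply PySem.Dict.getD_of_not_contains
  rw [PySem.Dict.contains_eq_decide_mem_keys]
  simp [h]

-- ---- per-digit word facts ----

-- the word A reads for digit dg is wordsL[dg], all its chars are lowercase
set_option maxRecDepth 8000 in
lemma wordA_eq (dg : Int) (h0 : 0 ≤ dg) (h1 : dg < 10) :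
    ((PySem.List.pyGet? digitWordsA dg).getD "").toList = wordsL.getD dg.toNat [] := by
  interval_cases dg <;> decide

set_option maxRecDepth 8000 in
lemma wordA_lower_bool (dg : Int) (h0 : 0 ≤ dg) (h1 : dg < 10) :
    (((PySem.List.pyGet? digitWordsA dg).getD "").toList.all
      (fun ch => 97 ≤ ch.toNat && ch.toNat ≤ 122)) = true := by
  interval_cases dg <;> decide

lemma wordA_lower (dg : Int) (h0 : 0 ≤ dg) (h1 : dg < 10) :
    ∀ k ∈ ((PySem.List.pyGet? digitWordsA dg).getD "").toList,
      97 ≤ k.toNat ∧ k.toNat ≤ 122 := by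
  intro k hk
  have := List.all_eq_true.mp (wordA_lower_bool dg h0 h1) k hk
  simp only [Bool.and_eq_true, decide_eq_true_eq] at this
  exact this

-- B reads the same word: wordsB[d] (as a string) has wordsL[d] as its chars
set_option maxRecDepth 8000 in
lemma wordB_eq (d : Nat) (h : d < 10) :
    (PySem.List.pyGetD wordsB (d : Int) "").toList = wordsL.getD d [] := by
  interval_cases d <;> decide

-- str.count by a single lowercase letter is the char count
set_option maxRecDepth 100000 in
lemma strcount_eq : ∀ i ∈ List.range 26, ∀ w ∈ wordsL,
    PySem.Chars.count w [Char.ofNat (97 + i)] = w.count (Char.ofNat (97 + i)) := by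
  decide

-- ---- histogram update ----

lemma sum_map_update (g : Nat → Int) (g' : Nat → Int) (w : Nat → Int) (j : Nat)
    (hj : j < 10) (hg : ∀ d, d < 10 → g' d = if d = j then g d + 1 else g d) :
    ((List.range 10).map (fun d => g' d * w d)).sum
      = ((List.range 10).map (fun d => g d * w d)).sum + w j := by
  have h0 := hg 0 (by omega); have h1 := hg 1 (by omega)
  have h2 := hg 2 (by omega); have h3 := hg 3 (by omega)
  have h4 := hg 4 (by omega); have h5 := hg 5 (by omega)
  have h6 := hg 6 (by omega); have h7 := hg 7 (by omega)
  have h8 := hg 8 (by omega); have h9 := hg 9 (by omega)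
  simp only [List.range_succ, List.map_append, List.map_cons, List.map_nil,
    List.sum_append, List.sum_cons, List.sum_nil, List.range_zero]
  interval_cases j <;>
    simp_all <;> ring

lemma getD_set_ten (hist : List Int) (j : Nat) (v : Int) (d : Nat)
    (hj : j < hist.length) :
    (hist.set j v).getD d 0 = if d = j then v else hist.getD d 0 := by
  by_cases he : d = j
  · subst he
    rw [List.getD_eq_getElem _ _ (by simpa using hj), List.getElem_set]
    simp
  · rcases Nat.lt_or_ge d hist.length with hdl | hdl
    · rw [List.getD_eq_getElem _ _ (by simpa using hdl),
        List.getD_eq_getElem _ _ hdl, List.getElem_set]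
      have hne : ¬ (j = d) := fun h => he h.symm
      simp [hne, he]
    · rw [List.getD_eq_default _ _ (by simpa using hdl),
        List.getD_eq_default _ _ hdl]
      simp [he]

-- one joint step of the two loops preserves the invariant
lemma inv_step (c : PySem.Dict Char Int) (hist : List Int) (dg : Int)
    (h0 : 0 ≤ dg) (h1 : dg < 10) (hi : CInv c hist) :
    CInv (addCounter c ((PySem.List.pyGet? digitWordsA dg).getD "").toList)
      (PySem.List.pySetD hist dg (PySem.List.pyGetD hist dg 0 + 1)) := by
  obtain ⟨hnd, hrange, hlen, hpos, hsum⟩ := hi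
  set w := ((PySem.List.pyGet? digitWordsA dg).getD "").toList with hw
  have hset : PySem.List.pySetD hist dg (PySem.List.pyGetD hist dg 0 + 1)
      = hist.set dg.toNat (hist.getD dg.toNat 0 + 1) := by
    rw [PySem.List.pyGetD_of_nonneg _ _ h0, PySem.List.pySetD_of_nonneg _ _ h0]
  have hdglt : dg.toNat < hist.length := by omega
  refine ⟨nodup_keys_addCounter c w hnd, ?_, ?_, ?_, ?_⟩
  · intro k hk
    rcases (mem_keys_addCounter c w k).mp hk with h | h
    · exact hrange k h
    · exact wordA_lower dg h0 h1 k h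
  · rw [hset]; simp [hlen]
  · intro d hd
    rw [hset, getD_set_ten hist dg.toNat _ d hdglt]
    split_ifs with he
    · have := hpos dg.toNat (by omega)
      omega
    · exact hpos d hd
  · intro k
    rw [getD_addCounter, hsum k, hset]
    have hwc : w.count k = wcount dg.toNat k := by
      rw [hw, wordA_eq dg h0 h1]; rfl
    rw [hwc]
    refine (sum_map_update (fun d => hist.getD d 0)
      (fun d => (hist.set dg.toNat (hist.getD dg.toNat 0 + 1)).getD d 0)
      (fun d => (wcount d k : Int)) dg.toNat (by omega) ?_).symm
    intro d _
    have h := getD_set_ten hist dg.toNat (hist.getD dg.toNat 0 + 1) d hdglt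
    by_cases he : d = dg.toNat
    · subst he; simpa using h
    · simpa [he] using h

lemma inv_init : CInv PySem.Dict.empty (List.replicate 10 0) := by
  refine ⟨?_, ?_, ?_, ?_, ?_⟩
  · simp [PySem.Dict.keys_empty]
  · simp [PySem.Dict.keys_empty]
  · simp
  · intro d hd; interval_cases d <;> simp
  · intro k
    rw [PySem.Dict.getD_empty]
    have : ∀ d ∈ List.range 10,
        (List.replicate 10 (0:Int)).getD d 0 * (wcount d k : Int) = 0 := by
      intro d hd
      rw [List.mem_range] at hd
      interval_cases d <;> simp
    rw [List.map_congr_left this]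
    simp

-- ---- the final stage: counter scan vs alphabet loop ----

def lcAlphabet : List Char := (List.range 26).map (fun i => Char.ofNat (97 + i))

lemma countP_eq_of_nodup (p : Char → Bool) (l U : List Char) (hl : l.Nodup)
    (hU : U.Nodup) (hsub : ∀ x ∈ l, x ∈ U) (hback : ∀ x ∈ U, p x = true → x ∈ l) :
    l.countP p = U.countP p := by
  rw [List.countP_eq_length_filter, List.countP_eq_length_filter]
  apply List.Perm.length_eq
  rw [List.perm_ext_iff_of_nodup (hl.filter p) (hU.filter p)]
  intro x
  simp only [List.mem_filter]
  constructor
  · rintro ⟨hx, hp⟩; exact ⟨hsub x hx, hp⟩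
  · rintro ⟨hx, hp⟩; exact ⟨hback x hx hp, hp⟩

lemma final_eq (c : PySem.Dict Char Int) (hist : List Int) (hi : CInv c hist) :
    countOddOf c
      = (PySem.List.pyRange 97 123 1).foldl (fun ans code =>
          ans + PySem.Int.mod (totalB hist (String.ofList [Char.ofNat code.toNat])) 2) 0 := by
  obtain ⟨hnd, hrange, hlen, hpos, hsum⟩ := hi
  -- A side: countOddOf c = countP over the whole alphabet
  unfold countOddOf
  rw [PySem.List.foldl_if_add_one (fun v => PySem.Int.mod v 2 == 1) c.values 0]
  rw [PySem.Dict.values_eq_map_keys c hnd 0, List.countP_map, zero_add]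
  have hUnd : lcAlphabet.Nodup := by decide
  have step1 : c.keys.countP ((fun v => PySem.Int.mod v 2 == 1) ∘ fun k => c.getD k 0)
      = lcAlphabet.countP ((fun v => PySem.Int.mod v 2 == 1) ∘ fun k => c.getD k 0) := by
    apply countP_eq_of_nodup _ _ _ hnd hUnd
    · intro k hk
      obtain ⟨hk1, hk2⟩ := hrange k hk
      unfold lcAlphabet
      rw [List.mem_map]
      refine ⟨k.toNat - 97, ?_, ?_⟩
      · rw [List.mem_range]; omega
      · have : 97 + (k.toNat - 97) = k.toNat := by omega
        rw [this, Char.ofNat_toNat]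
    · intro k _ hp
      by_contra hk
      rw [Function.comp_apply, getD_zero_of_not_mem_keys c k hk] at hp
      simp at hp
  rw [step1]
  -- B side: the foldl is a sum over the 26 codes
  rw [PySem.List.foldl_add (PySem.List.pyRange 97 123 1)
    (fun code => PySem.Int.mod (totalB hist (String.ofList [Char.ofNat code.toNat])) 2)
    0, zero_add]
  have hcodes : PySem.List.pyRange 97 123 1
      = (List.range 26).map (fun i => ((97 + i : Nat) : Int)) := by decide
  rw [hcodes, List.map_map]
  -- countP as an Int 0/1-sum over the same index list
  unfold lcAlphabet
  rw [List.countP_map]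
  have hcp : (List.range 26).countP
        (((fun v => PySem.Int.mod v 2 == 1) ∘ fun k => c.getD k 0) ∘ fun i => Char.ofNat (97 + i))
      = (List.range 26).countP
        (fun i => PySem.Int.mod (c.getD (Char.ofNat (97 + i)) 0) 2 == 1) := by
    apply List.countP_congr
    intro i _
    simp [Function.comp]
  rw [hcp, ← PySem.List.sum_map_ite_one_zero
      (fun i => PySem.Int.mod (c.getD (Char.ofNat (97 + i)) 0) 2 == 1) (List.range 26)]
  apply congrArg
  apply List.map_congr_left
  intro i hi26
  rw [List.mem_range] at hi26
  -- pointwise: the odd indicator for letter i equals totalB … mod 2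
  simp only [Function.comp_apply, Int.toNat_natCast]
  -- totalB equals the invariant's weighted sum, hence c.getD
  have htot : totalB hist (String.ofList [Char.ofNat (97 + i)])
      = c.getD (Char.ofNat (97 + i)) 0 := by
    rw [hsum]
    unfold totalB
    have hlist : PySem.List.pyRange 0 10 1 = (List.range 10).map (fun d : Nat => (d : Int)) := by
      decide
    rw [hlist, List.map_map]
    apply congrArg
    apply List.map_congr_left
    intro d hd
    rw [List.mem_range] at hd
    simp only [Function.comp_apply]
    rw [PySem.List.pyGetD_natCast]
    have hcnt : PySem.Str.count (PySem.List.pyGetD wordsB (d : Int) "")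
          (String.ofList [Char.ofNat (97 + i)])
        = (wordsL.getD d []).count (Char.ofNat (97 + i)) := by
      rw [PySem.Str.count_eq]
      have hb := wordB_eq d hd
      rw [hb]
      have hmem : wordsL.getD d [] ∈ wordsL := by
        interval_cases d <;> decide
      have hsc := strcount_eq i (by rw [List.mem_range]; omega) _ hmem
      simpa using hsc
    rw [hcnt]
    rfl
  rw [htot, PySem.Int.mod_eq_emod_of_pos (by norm_num : (0:Int) < 2)]
  rcases Int.emod_two_eq_zero_or_one (c.getD (Char.ofNat (97 + i)) 0) with h | h <;>
    rw [h] <;> norm_num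

-- joint induction over the digit loops
lemma loops_agree : ∀ (N : Nat) (n : Int), n.toNat ≤ N → ∀ c hist, CInv c hist →
    countOddOf (loopA n c)
      = (PySem.List.pyRange 97 123 1).foldl (fun ans code =>
          ans + PySem.Int.mod (totalB (loopB n hist) (String.ofList [Char.ofNat code.toNat])) 2) 0 := by
  intro N
  induction N with
  | zero =>
    intro n hn c hist hinv
    have hnp : ¬ n > 0 := by omega
    rw [loopA, loopB, dif_neg hnp, dif_neg hnp]
    exact final_eq c hist hinv
  | succ N ih =>
    intro n hn c hist hinv
    by_cases hnp : n > 0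
    · rw [loopA, loopB, dif_pos hnp, dif_pos hnp]
      have hd0 : 0 ≤ PySem.Int.mod n 10 := PySem.Int.mod_nonneg n (by norm_num)
      have hd1 : PySem.Int.mod n 10 < 10 := PySem.Int.mod_lt n (by norm_num)
      have hbound : (PySem.Int.floordiv n 10).toNat ≤ N := by
        rw [PySem.Int.floordiv_eq_ediv_of_pos (by norm_num)]
        have h1 := Int.mul_ediv_add_emod n 10
        have h2 := Int.emod_nonneg n (by norm_num : (10:Int) ≠ 0)
        have h3 := Int.emod_lt_of_pos n (by norm_num : (0:Int) < 10)
        omega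
      exact ih _ hbound _ _ (inv_step c hist _ hd0 hd1 hinv)
    · rw [loopA, loopB, dif_neg hnp, dif_neg hnp]
      exact final_eq c hist hinv

-- ===== VERDICT (by name: the statement is the Claim_ definition above) =====
theorem countOddLetters_spec : Claim_equal_countOddLetters := by
  intro n _
  show countOddLetters n = countOddLetters_alt n
  unfold countOddLetters countOddLetters_alt
  exact loops_agree n.toNat n le_rfl _ _ inv_init
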